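-- pv_equiv track=rewrite | github.com/foroughmand/quran-recitation-movie-maker | src/create_movie_persian_juz_by_page.py | _space_from_ayah_text
-- ===== SOURCE A (Python) =====
-- def _space_from_ayah_text(arabic_text: str) -> str:
--     """Find the first run of space/separator characters in ayah text (same font as page). Use between ayahs."""
--     if not arabic_text:
--         return " "
--     i = 0
--     n = len(arabic_text)
--     while i < n and not arabic_text[i].isspace():
--         i += 1
--     if i >= n:
--         return " "
--     start = i
--     while i < n and arabic_text[i].isspace():
--         i += 1
--     return arabic_text[start:i] if start < i else " "
-- ===== SOURCE B (Python) =====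
-- import re
--
--
-- def _space_from_ayah_text(arabic_text: str) -> str:
--     """Find the first run of space/separator characters in ayah text (same font as page). Use between ayahs."""
--     if not arabic_text:
--         return " "
--     m = re.search(r"\s+", arabic_text)
--     return m.group() if m else " "
-- ===== Notes on version B (the rewrite author's own statement) =====
-- stated objective: idiomatic
-- what changed: Replaces the two explicit index-based while-loops (skip non-space, then collect the space run) with a single re.search for the first maximal \s+ run, relying on \s matching exactly str.isspace() characters.
import Mathlib
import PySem

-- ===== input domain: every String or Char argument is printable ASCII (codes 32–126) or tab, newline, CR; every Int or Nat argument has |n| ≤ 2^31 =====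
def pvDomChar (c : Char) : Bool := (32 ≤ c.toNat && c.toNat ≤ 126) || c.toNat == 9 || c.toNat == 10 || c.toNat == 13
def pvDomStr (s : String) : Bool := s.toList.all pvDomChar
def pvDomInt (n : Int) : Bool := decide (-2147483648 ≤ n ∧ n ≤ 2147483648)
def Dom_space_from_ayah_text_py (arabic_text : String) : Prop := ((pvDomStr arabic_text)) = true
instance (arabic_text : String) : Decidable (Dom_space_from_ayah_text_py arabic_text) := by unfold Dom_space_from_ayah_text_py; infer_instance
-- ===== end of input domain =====

-- B replaces A's two explicit index while-loops with a single search for the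
-- first maximal whitespace run (re.search(r"\s+") in Python; here dropWhile/takeWhile).

-- ===== PORT A =====
-- first while-loop: advance i while i < n and not text[i].isspace()
def pvASkip (cs : List Char) (n i : Nat) : Nat :=
  if i < n ∧ PySem.Chars.isspace (cs.getD i ' ') = false then pvASkip cs n (i + 1) else i
termination_by n - i

-- second while-loop: advance i while i < n and text[i].isspace()
def pvACollect (cs : List Char) (n i : Nat) : Nat :=
  if i < n ∧ PySem.Chars.isspace (cs.getD i ' ') = true then pvACollect cs n (i + 1) else i
termination_by n - i

def space_from_ayah_text_py (arabic_text : String) : String :=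
  let cs := arabic_text.toList
  if cs = [] then " "
  else
    let n := cs.length
    let i := pvASkip cs n 0
    if n ≤ i then " "
    else
      let start := i
      let j := pvACollect cs n i
      if start < j then String.ofList (PySem.List.slice cs (some (start : Int)) (some (j : Int))) else " "

-- ===== PORT B =====
-- re.search(r"\s+", text): the first maximal run of isspace characters (none ↔ empty run)
def space_from_ayah_text_py_alt (arabic_text : String) : String :=
  let cs := arabic_text.toList
  if cs = [] then " "
  else
    let run := (cs.dropWhile (fun c => !PySem.Chars.isspace c)).takeWhile (fun c => PySem.Chars.isspace c)
    if run = [] then " " else String.ofList run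

-- ===== PRECONDITION & SPEC =====
def Spec_space_from_ayah_text_py (arabic_text : String) (out : String) : Prop := out = space_from_ayah_text_py_alt arabic_text
instance (arabic_text : String) (out : String) : Decidable (Spec_space_from_ayah_text_py arabic_text out) := by unfold Spec_space_from_ayah_text_py; infer_instance

-- ===== CLAIM (what is proved, stated in full; the proofs are below) =====
def Claim_equal_space_from_ayah_text_py : Prop := ∀ (arabic_text : String), Dom_space_from_ayah_text_py arabic_text → Spec_space_from_ayah_text_py arabic_text (space_from_ayah_text_py arabic_text)

-- ===== LEMMAS AND PROOFS =====

theorem pvASkip_eq (cs : List Char) (i : Nat) :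
    pvASkip cs cs.length i = i + ((cs.drop i).takeWhile (fun c => !PySem.Chars.isspace c)).length := by
  fun_induction pvASkip cs cs.length i with
  | case1 i h ih =>
    obtain ⟨hlt, hsp⟩ := h
    rw [List.getD_eq_getElem cs ' ' hlt] at hsp
    rw [ih, List.drop_eq_getElem_cons hlt, List.takeWhile_cons]
    simp [hsp]; omega
  | case2 i h =>
    rcases Nat.lt_or_ge i cs.length with hlt | hge
    · have hsp : PySem.Chars.isspace (cs[i]) = true := by
        by_contra hne
        exact h ⟨hlt, by rw [List.getD_eq_getElem cs ' ' hlt]; simpa using hne⟩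
      rw [List.drop_eq_getElem_cons hlt, List.takeWhile_cons]
      simp [hsp]
    · simp [List.drop_eq_nil_of_le hge]

theorem pvACollect_eq (cs : List Char) (i : Nat) :
    pvACollect cs cs.length i = i + ((cs.drop i).takeWhile (fun c => PySem.Chars.isspace c)).length := by
  fun_induction pvACollect cs cs.length i with
  | case1 i h ih =>
    obtain ⟨hlt, hsp⟩ := h
    rw [List.getD_eq_getElem cs ' ' hlt] at hsp
    rw [ih, List.drop_eq_getElem_cons hlt, List.takeWhile_cons]
    simp [hsp]; omega
  | case2 i h =>
    rcases Nat.lt_or_ge i cs.length with hlt | hge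
    · have hsp : PySem.Chars.isspace (cs[i]) = false := by
        by_contra hne
        exact h ⟨hlt, by rw [List.getD_eq_getElem cs ' ' hlt]; simpa using hne⟩
      rw [List.drop_eq_getElem_cons hlt, List.takeWhile_cons]
      simp [hsp]
    · simp [List.drop_eq_nil_of_le hge]

theorem pv_dropWhile_eq_drop (p : Char → Bool) (cs : List Char) :
    cs.dropWhile p = cs.drop ((cs.takeWhile p).length) := by
  induction cs with
  | nil => simp
  | cons a t ih => by_cases h : p a <;> simp [List.dropWhile, List.takeWhile, h, ih]

theorem pv_take_length_takeWhile (p : Char → Bool) (l : List Char) :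
    l.take (l.takeWhile p).length = l.takeWhile p := by
  induction l with
  | nil => simp
  | cons a t ih => by_cases h : p a <;> simp [h, ih]

theorem pv_takeWhile_stop (p : Char → Bool) (l : List Char)
    (h : (l.takeWhile p).length < l.length) : p (l[(l.takeWhile p).length]) = false := by
  induction l with
  | nil => simp at h
  | cons a tl ih =>
    by_cases hpa : p a
    · simp only [List.takeWhile_cons, hpa, if_true, List.length_cons] at h ⊢
      simpa using ih (by omega)
    · simp [hpa] at h ⊢

-- ===== VERDICT (by name: the statement is the Claim_ definition above) =====
theorem space_from_ayah_text_py_spec : Claim_equal_space_from_ayah_text_py := by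
  intro s _
  unfold Spec_space_from_ayah_text_py
  simp only [space_from_ayah_text_py, space_from_ayah_text_py_alt]
  generalize s.toList = cs
  by_cases hnil : cs = []
  · simp [hnil]
  · rw [if_neg hnil, if_neg hnil]
    have hskip : pvASkip cs cs.length 0
        = (cs.takeWhile (fun c => !PySem.Chars.isspace c)).length := by
      simpa using pvASkip_eq cs 0
    set t := cs.takeWhile (fun c => !PySem.Chars.isspace c) with ht
    rw [hskip, pv_dropWhile_eq_drop]
    by_cases hle : cs.length ≤ t.length
    · have hlen : t.length = cs.length :=
        Nat.le_antisymm (ht ▸ (List.takeWhile_sublist _).length_le) hle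
      rw [if_pos hle, List.drop_eq_nil_of_le (le_of_eq hlen.symm)]
      simp
    · have hlt : t.length < cs.length := Nat.lt_of_not_le hle
      rw [if_neg hle]
      have hsp : PySem.Chars.isspace (cs[t.length]) = true := by
        have := pv_takeWhile_stop (fun c => !PySem.Chars.isspace c) cs (ht ▸ hlt)
        simpa [← ht] using this
      have hdrop : cs.drop t.length = cs[t.length] :: cs.drop (t.length + 1) :=
        List.drop_eq_getElem_cons hlt
      set r := (cs.drop t.length).takeWhile (fun c => PySem.Chars.isspace c) with hr
      have hrcons : r = cs[t.length] :: ((cs.drop (t.length + 1)).takeWhile (fun c => PySem.Chars.isspace c)) := by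
        rw [hr, hdrop, List.takeWhile_cons, hsp]
        simp
      have hcol : pvACollect cs cs.length t.length = t.length + r.length :=
        pvACollect_eq cs t.length
      rw [hcol]
      have hrpos : 0 < r.length := by rw [hrcons]; simp
      rw [if_pos (by omega), if_neg (by rw [hrcons]; simp)]
      have hslice : PySem.List.slice cs (some (t.length : Int)) (some ((t.length + r.length : Nat) : Int))
          = (cs.drop t.length).take r.length := by
        rw [PySem.List.slice_natCast]
        congr 1
        omega
      rw [hslice, hr, pv_take_length_takeWhile]
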